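-- pv_equiv track=rewrite | github.com/spiaz/advent_of_code_2022 | Day01/day01.py | sum_max_n_cals
-- ===== SOURCE A (Python) =====
-- from typing import Dict, Tuple
--
-- def count_calories(log: str) -> Dict[int, int]:
--     log_by_elf = [x for x in log.split("\n\n")]
--
--     elf_to_cal = {}
--
--     for elf, cals in enumerate(log_by_elf, 1):
--         elf_to_cal[elf] = sum([int(x) for x in cals.split()])
--
--     return elf_to_cal
--
-- def elf_max_cals(cnt: dict) -> Tuple[int, int]:
--     max_elf = max(cnt, key=cnt.get)
--     return max_elf, cnt[max_elf]
--
-- def sum_max_n_cals(log: str, n=3) -> int: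
--     cnt = count_calories(log)
--     cals = 0
--     for i in range(n):
--         elf, cal = elf_max_cals(cnt)
--         cals += cal
--         cnt.pop(elf)
--     return cals
-- ===== SOURCE B (Python) =====
-- def sum_max_n_cals(log: str, n=3) -> int:
--     totals = sorted(
--         (sum(int(x) for x in chunk.split()) for chunk in log.split("\n\n")),
--         reverse=True,
--     )
--     return sum(totals[: max(n, 0)])
-- ===== Notes on version B (the rewrite author's own statement) =====
-- stated objective: simpler
-- what changed: B replaces A's n rounds of scanning a shrinking dict for its maximum (max over keys, then pop) by building the list of per-elf totals once, sorting it in descending order and summing its first max(n,0) elements.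
import Mathlib
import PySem

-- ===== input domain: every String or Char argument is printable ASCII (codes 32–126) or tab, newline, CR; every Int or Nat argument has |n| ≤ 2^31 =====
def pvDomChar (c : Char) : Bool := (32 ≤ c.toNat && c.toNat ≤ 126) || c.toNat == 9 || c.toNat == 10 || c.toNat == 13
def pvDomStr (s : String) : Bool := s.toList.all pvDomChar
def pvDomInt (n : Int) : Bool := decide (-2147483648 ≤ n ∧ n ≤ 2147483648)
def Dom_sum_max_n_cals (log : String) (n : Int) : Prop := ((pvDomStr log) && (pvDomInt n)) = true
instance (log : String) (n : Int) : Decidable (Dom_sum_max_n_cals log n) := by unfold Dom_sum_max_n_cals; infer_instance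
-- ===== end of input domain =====

-- B replaces A's n rounds of find-max-and-pop over a shrinking dict by one descending sort
-- of the per-elf totals followed by summing its first max(n,0) elements (objective: simpler).

-- ===== PORT A =====
-- shared by both ports: sum(int(x) for x in chunk.split()); int() is total here under Pre_ (every token parses)
def elfTotal (chunk : String) : Int :=
  ((PySem.Str.split₀ chunk).map (fun x => (PySem.Int.ofStr? x).getD 0)).sum

def count_calories (log : String) : PySem.Dict Int Int :=
  -- log.split("\n\n"): sep is non-empty, so split? is always some
  let log_by_elf := (PySem.Str.split? log "\n\n").getD []
  (PySem.List.enumerate log_by_elf 1).foldl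
    (fun d p => d.insert p.1 (elfTotal p.2)) PySem.Dict.empty

-- max(cnt, key=cnt.get): first key attaining the maximal value; none = ValueError on empty dict
def elf_max_cals (cnt : PySem.Dict Int Int) : Option (Int × Int) :=
  (PySem.List.max? cnt.keys (fun k => cnt.getD k 0)).map (fun m => (m, cnt.getD m 0))

def sum_max_n_cals (log : String) (n : Int) : Int :=
  let cnt := count_calories log
  ((PySem.List.pyRange 0 n 1).foldl
    (fun st _ =>
      match elf_max_cals st.1 with
      | some ec => (st.1.erase ec.1, st.2 + ec.2)   -- cnt.pop(elf); cals += cal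
      | none => st)                                  -- Python raises ValueError here; excluded by Pre_
    (cnt, 0)).2

-- ===== PORT B =====
def sum_max_n_cals_alt (log : String) (n : Int) : Int :=
  (PySem.List.slice
    (PySem.List.sorted (((PySem.Str.split? log "\n\n").getD []).map elfTotal) (fun x => x) true)
    none (some (max n 0))).sum

-- ===== PRECONDITION & SPEC =====
-- Pre_ excludes exactly the inputs where Python A raises: a whitespace token that int() rejects
-- (ValueError), or n larger than the number of blank-line-separated chunks (max() of an emptied dict).
def Pre_sum_max_n_cals (log : String) (n : Int) : Prop :=
  (∀ chunk ∈ (PySem.Str.split? log "\n\n").getD [],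
     ∀ tok ∈ PySem.Str.split₀ chunk, (PySem.Int.ofStr? tok).isSome = true) ∧
  n ≤ (((PySem.Str.split? log "\n\n").getD []).length : Int)
instance (log : String) (n : Int) : Decidable (Pre_sum_max_n_cals log n) := by
  unfold Pre_sum_max_n_cals; infer_instance

def pvWitness_sum_max_n_cals : String × Int := ("1 2\n\n3", 2)

def Spec_sum_max_n_cals (log : String) (n : Int) (out : Int) : Prop := out = sum_max_n_cals_alt log n
instance (log : String) (n : Int) (out : Int) : Decidable (Spec_sum_max_n_cals log n out) := by
  unfold Spec_sum_max_n_cals; infer_instance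

-- ===== CLAIM (what is proved, stated in full; the proofs are below) =====
def Claim_equal_sum_max_n_cals : Prop := ∀ (log : String) (n : Int), Dom_sum_max_n_cals log n → Pre_sum_max_n_cals log n → Spec_sum_max_n_cals log n (sum_max_n_cals log n)

-- ===== LEMMAS AND PROOFS =====

-- sorted(xs, reverse=True) with the identity key, the object both sides agree on
def sd (xs : List Int) : List Int := PySem.List.sorted xs (fun x => x) true

theorem sd_pairwise (xs : List Int) : (sd xs).Pairwise (fun a b : Int => b ≤ a) := by
  simpa [sd] using PySem.List.sorted_pairwise_rev xs (fun x => x)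

theorem sd_perm (xs : List Int) : (sd xs).Perm xs :=
  PySem.List.sorted_perm xs (fun x => x) true

theorem sd_congr {xs ys : List Int} (h : xs.Perm ys) : sd xs = sd ys :=
  List.Perm.eq_of_pairwise (fun _ _ _ _ h1 h2 => le_antisymm h2 h1)
    (sd_pairwise xs) (sd_pairwise ys) (((sd_perm xs).trans h).trans (sd_perm ys).symm)

theorem sd_cons_max (v : Int) (zs : List Int) (h : ∀ z ∈ zs, z ≤ v) :
    sd (v :: zs) = v :: sd zs :=
  List.Perm.eq_of_pairwise (fun _ _ _ _ h1 h2 => le_antisymm h2 h1)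
    (sd_pairwise (v :: zs))
    (List.pairwise_cons.mpr ⟨fun b hb => h b ((sd_perm zs).mem_iff.mp hb), sd_pairwise zs⟩)
    ((sd_perm (v :: zs)).trans ((sd_perm zs).symm.cons v))

-- removing the (unique-keyed) entry (e, v) from an items list: values lose one copy of v
theorem values_perm_filter (l : List (Int × Int)) (e v : Int)
    (hnd : (l.map (·.1)).Nodup) (hmem : (e, v) ∈ l) :
    (l.map (·.2)).Perm (v :: (l.filter (fun p => !(p.1 == e))).map (·.2)) := by
  induction l with
  | nil => cases hmem
  | cons hd tl ih =>
    rcases List.mem_cons.mp hmem with heq | htl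
    · subst heq
      have hnotin : ∀ p ∈ tl, (!(p.1 == e)) = true := by
        intro p hp
        have : e ∉ tl.map (·.1) := (List.nodup_cons.mp hnd).1
        simp only [Bool.not_eq_eq_eq_not, Bool.not_true, beq_eq_false_iff_ne]
        exact fun hpe => this (List.mem_map.mpr ⟨p, hp, hpe⟩)
      simp [List.filter_eq_self.mpr hnotin]
    · have hne : hd.1 ≠ e := by
        intro hcontra
        have : hd.1 ∈ tl.map (fun p : Int × Int => p.1) :=
          List.mem_map.mpr ⟨(e, v), htl, hcontra.symm⟩
        exact (List.nodup_cons.mp hnd).1 this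
      have hkeep : (!(hd.1 == e)) = true := by simpa using hne
      have ihp := ih (List.nodup_cons.mp hnd).2 htl
      have h1 : ((hd :: tl).map (·.2)).Perm
          (hd.2 :: v :: ((tl.filter (fun p => !(p.1 == e))).map (·.2))) := ihp.cons hd.2
      have h2 : (hd.2 :: v :: ((tl.filter (fun p => !(p.1 == e))).map (·.2))).Perm
          (v :: hd.2 :: ((tl.filter (fun p => !(p.1 == e))).map (·.2))) := List.Perm.swap _ _ _
      have h3 : v :: hd.2 :: ((tl.filter (fun p => !(p.1 == e))).map (·.2))
          = v :: ((hd :: tl).filter (fun p => !(p.1 == e))).map (·.2) := by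
        simp [hkeep]
      exact h3 ▸ (h1.trans h2)

-- one round of A's loop on a nonempty dict: extract the maximal value, keep keys unique
theorem loop_inv (l : List Int) (d : PySem.Dict Int Int) (c : Int)
    (hnd : d.keys.Nodup) (hlen : l.length ≤ d.values.length) :
    (l.foldl
      (fun st _ =>
        match elf_max_cals st.1 with
        | some ec => (st.1.erase ec.1, st.2 + ec.2)
        | none => st)
      (d, c)).2 = c + ((sd d.values).take l.length).sum := by
  induction l generalizing d c with
  | nil => simp
  | cons x tl ih =>
    have hkeysne : d.keys ≠ [] := by
      intro hk
      have : d.values.length = 0 := by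
        have : d.items = [] := by
          have := congrArg List.length hk
          simpa [PySem.Dict.keys] using this
        simp [PySem.Dict.values, this]
      simp [this] at hlen
    obtain ⟨elf, hmax⟩ : ∃ elf, PySem.List.max? d.keys (fun k => d.getD k 0) = some elf := by
      cases hm : PySem.List.max? d.keys (fun k => d.getD k 0) with
      | none => exact absurd ((PySem.List.max?_eq_none_iff _ _).mp hm) hkeysne
      | some m => exact ⟨m, rfl⟩
    set v := d.getD elf 0 with hv
    have hstep : elf_max_cals d = some (elf, v) := by
      simp [elf_max_cals, hmax, hv]
    have helfmem : elf ∈ d.keys := PySem.List.max?_mem hmax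
    obtain ⟨w, hw⟩ : ∃ x, (elf, x) ∈ d.items := by simpa [PySem.Dict.keys] using helfmem
    have hpair : (elf, v) ∈ d.items := by
      have : d.getD elf 0 = w := PySem.Dict.getD_of_mem_items d hw hnd 0
      rw [hv, this]
      exact hw
    have hmaxval : ∀ y ∈ d.values, y ≤ v := by
      intro y hy
      rw [PySem.Dict.values_eq_map_keys d hnd 0] at hy
      obtain ⟨k, hk, rfl⟩ := List.mem_map.mp hy
      exact PySem.List.max?_isMax hmax k hk
    have hperm : d.values.Perm (v :: (d.erase elf).values) := by
      have := values_perm_filter d.items elf v hnd hpair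
      simpa [PySem.Dict.erase, PySem.Dict.values, PySem.Dict.keys] using this
    have hnd' : (d.erase elf).keys.Nodup := by
      have hsub : ((d.items.filter (fun p => !(p.1 == elf))).map (·.1)).Sublist (d.items.map (·.1)) :=
        List.Sublist.map _ List.filter_sublist
      have : (d.erase elf).keys = (d.items.filter (fun p => !(p.1 == elf))).map (·.1) := by
        simp [PySem.Dict.erase, PySem.Dict.keys]
      rw [this]
      exact List.Nodup.sublist hsub (by simpa [PySem.Dict.keys] using hnd)
    have hlen' : tl.length ≤ (d.erase elf).values.length := by
      have := hperm.length_eq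
      simp only [List.length_cons] at this hlen
      omega
    have hsd : sd d.values = v :: sd (d.erase elf).values := by
      rw [sd_congr hperm]
      exact sd_cons_max v _ (fun z hz => hmaxval z (hperm.mem_iff.mpr (List.mem_cons_of_mem _ hz)))
    rw [List.foldl_cons]
    have hred : (match elf_max_cals (d, c).1 with
        | some ec => ((d, c).1.erase ec.1, (d, c).2 + ec.2)
        | none => (d, c)) = (d.erase elf, c + v) := by
      show (match elf_max_cals d with
        | some ec => (d.erase ec.1, c + ec.2)
        | none => (d, c)) = (d.erase elf, c + v)
      rw [hstep]
    rw [hred, ih _ _ hnd' hlen', hsd]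
    simp only [List.length_cons, List.take_succ_cons, List.sum_cons]
    ring

-- the dict A builds: items are ((1, t1), (2, t2), …) over the chunk totals, keys distinct
theorem count_items (log : String) :
    (count_calories log).items =
      (PySem.List.enumerate ((PySem.Str.split? log "\n\n").getD []) 1).map
        (fun p => (p.1, elfTotal p.2)) := by
  unfold count_calories
  have hfresh : ∀ p ∈ PySem.List.enumerate ((PySem.Str.split? log "\n\n").getD []) 1,
      (PySem.Dict.empty : PySem.Dict Int Int).contains p.1 = false := by
    intro p _; simp [PySem.Dict.contains_empty]
  have hnodup : ((PySem.List.enumerate ((PySem.Str.split? log "\n\n").getD []) 1).map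
      (fun p : Int × String => p.1)).Nodup := by
    have hpw : ((PySem.List.enumerate ((PySem.Str.split? log "\n\n").getD []) 1).map
        (fun p : Int × String => p.1)).Pairwise (· ≠ ·) :=
      List.pairwise_map.mpr
        ((PySem.List.pairwise_lt_enumerate ((PySem.Str.split? log "\n\n").getD []) 1).imp (fun h => ne_of_lt h))
    exact hpw
  have := PySem.Dict.items_foldl_insert_fresh
    (PySem.List.enumerate ((PySem.Str.split? log "\n\n").getD []) 1)
    (fun p => p.1) (fun p => elfTotal p.2) PySem.Dict.empty hfresh hnodup
  simpa [PySem.Dict.empty] using this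

theorem count_keys_nodup (log : String) : (count_calories log).keys.Nodup := by
  have h := count_items log
  simp only [PySem.Dict.keys, h, List.map_map]
  have hpw : ((PySem.List.enumerate ((PySem.Str.split? log "\n\n").getD []) 1).map
      (fun p : Int × String => ((p.1, elfTotal p.2) : Int × Int).1)).Pairwise (· ≠ ·) :=
    List.pairwise_map.mpr
      ((PySem.List.pairwise_lt_enumerate ((PySem.Str.split? log "\n\n").getD []) 1).imp
        (fun h => ne_of_lt h))
  simpa using hpw

theorem count_values (log : String) :
    (count_calories log).values = ((PySem.Str.split? log "\n\n").getD []).map elfTotal := by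
  have h := count_items log
  simp only [PySem.Dict.values, h, List.map_map]
  have h2 : ((PySem.List.enumerate ((PySem.Str.split? log "\n\n").getD []) 1).map (·.2)).map elfTotal
      = ((PySem.Str.split? log "\n\n").getD []).map elfTotal := by
    rw [PySem.List.map_snd_enumerate]
  rw [← h2, List.map_map]
  rfl

-- ===== VERDICT (by name: the statement is the Claim_ definition above) =====
theorem sum_max_n_cals_spec : Claim_equal_sum_max_n_cals := by
  intro log n _ hpre
  unfold Spec_sum_max_n_cals sum_max_n_cals sum_max_n_cals_alt
  have hlenpr : (PySem.List.pyRange 0 n 1).length = n.toNat := by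
    simp [PySem.List.length_pyRange_one 0 n]
  have hlen : (PySem.List.pyRange 0 n 1).length ≤ (count_calories log).values.length := by
    rw [hlenpr, count_values]
    have := hpre.2
    simp only [List.length_map]
    omega
  rw [loop_inv _ _ _ (count_keys_nodup log) hlen, hlenpr]
  rw [PySem.List.slice_to _ (le_max_right n 0)]
  have hmaxnat : (max n 0).toNat = n.toNat := by omega
  rw [hmaxnat, count_values]
  simp [sd]
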